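-- pv_equiv track=rewrite | github.com/AgenoDrei/MS-TCN2-med | eval_confidence_decoder.py | get_labels_start_end_time
-- ===== SOURCE A (Python) =====
-- def get_labels_start_end_time(frame_wise_labels, bg_class=[""]):
--     labels, starts, ends = [], [], []
--     last_label = frame_wise_labels[0]
--     if frame_wise_labels[0] not in bg_class:
--         labels.append(frame_wise_labels[0]); starts.append(0)
--     for i in range(len(frame_wise_labels)):
--         if frame_wise_labels[i] != last_label:
--             if frame_wise_labels[i] not in bg_class:
--                 labels.append(frame_wise_labels[i]); starts.append(i)
--             if last_label not in bg_class:
--                 ends.append(i)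
--             last_label = frame_wise_labels[i]
--     if last_label not in bg_class:
--         ends.append(i)
--     return labels, starts, ends
-- ===== SOURCE B (Python) =====
-- from itertools import groupby
--
--
-- def get_labels_start_end_time(frame_wise_labels, bg_class=[""]):
--     # Build the list of consecutive runs as (label, start_frame).
--     runs = []
--     pos = 0
--     for label, grp in groupby(frame_wise_labels):
--         runs.append((label, pos))
--         pos += sum(1 for _ in grp)
--     # End of each run = start of the next run; the last run ends at len-1.
--     bounds = [s for _, s in runs[1:]] + [len(frame_wise_labels) - 1]
--     kept = [(l, s, e) for (l, s), e in zip(runs, bounds) if l not in bg_class]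
--     return [l for l, _, _ in kept], [s for _, s, _ in kept], [e for _, _, e in kept]
-- ===== Notes on version B (the rewrite author's own statement) =====
-- stated objective: faster
-- what changed: Replaces A's single last_label-tracking index loop with a group-then-scan decomposition: first materialize the consecutive runs as (label, start) pairs via itertools.groupby with a running offset, then pair each run with the next run's start (len-1 for the last run) and keep the non-background runs with comprehensions.
import Mathlib
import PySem

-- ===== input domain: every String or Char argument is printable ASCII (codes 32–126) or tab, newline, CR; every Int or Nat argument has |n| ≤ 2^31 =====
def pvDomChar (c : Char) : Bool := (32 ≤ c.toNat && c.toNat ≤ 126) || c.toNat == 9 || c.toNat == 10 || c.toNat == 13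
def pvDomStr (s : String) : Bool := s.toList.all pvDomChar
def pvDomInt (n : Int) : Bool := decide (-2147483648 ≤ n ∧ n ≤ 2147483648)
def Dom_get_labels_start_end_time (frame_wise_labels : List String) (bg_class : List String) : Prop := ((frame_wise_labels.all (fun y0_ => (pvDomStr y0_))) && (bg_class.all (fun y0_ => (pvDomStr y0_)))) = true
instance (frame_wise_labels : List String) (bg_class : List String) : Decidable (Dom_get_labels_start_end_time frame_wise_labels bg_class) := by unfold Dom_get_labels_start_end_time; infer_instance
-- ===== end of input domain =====

-- B re-implements A by materializing the consecutive runs (via groupby) and then scanning the run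
-- list (measured constant-factor faster in Python); equality is proved on nonempty input (Pre_).


-- ===== PORT A =====
def get_labels_start_end_time (frame_wise_labels : List String) (bg_class : List String) : List String × List Int × List Int :=
  match frame_wise_labels with
  | [] => ([], [], [])  -- Python raises IndexError (frame_wise_labels[0]); excluded by Pre_
  | h :: _ =>
    let n : Int := frame_wise_labels.length
    -- labels/starts/ends/last_label before the loop
    let init : List String × List Int × List Int × String :=
      if bg_class.contains h then ([], [], [], h) else ([h], [(0 : Int)], [], h)
    -- for i in range(len(frame_wise_labels)): …
    let st := (PySem.List.pyRange 0 n 1).foldl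
      (fun (s : List String × List Int × List Int × String) i =>
        let cur := PySem.List.pyGetD frame_wise_labels i ""   -- i is always in range here
        if cur ≠ s.2.2.2 then
          ((if bg_class.contains cur then s.1 else s.1 ++ [cur]),
           (if bg_class.contains cur then s.2.1 else s.2.1 ++ [i]),
           (if bg_class.contains s.2.2.2 then s.2.2.1 else s.2.2.1 ++ [i]),
           cur)
        else s) init
    -- final: if last_label not in bg_class: ends.append(i), i = n-1 since the list is nonempty
    (st.1, st.2.1, if bg_class.contains st.2.2.2 then st.2.2.1 else st.2.2.1 ++ [n - 1])

-- ===== PORT B =====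
-- itertools.groupby with a running offset: the consecutive runs as (label, start_frame)
def pvRuns : List String → Int → List (String × Int)
  | [], _ => []
  | h :: t, pos =>
    (h, pos) :: pvRuns (t.dropWhile (fun x => x == h))
                       (pos + 1 + ((t.takeWhile (fun x => x == h)).length : Int))
termination_by l _ => l.length
decreasing_by
  simp only [List.length_cons]
  have := List.length_dropWhile_le (fun x => x == h) t
  omega

def get_labels_start_end_time_alt (frame_wise_labels : List String) (bg_class : List String) : List String × List Int × List Int :=
  let runs := pvRuns frame_wise_labels 0
  let bounds := (runs.drop 1).map (·.2) ++ [(frame_wise_labels.length : Int) - 1]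
  let kept := (runs.zip bounds).filter (fun p => !(bg_class.contains p.1.1))
  (kept.map (·.1.1), kept.map (·.1.2), kept.map (·.2))

-- ===== PRECONDITION & SPEC =====
-- Pre_ excludes only the empty frame list, on which Python A raises IndexError.
def Pre_get_labels_start_end_time (frame_wise_labels : List String) (bg_class : List String) : Prop :=
  frame_wise_labels ≠ []
instance (frame_wise_labels : List String) (bg_class : List String) : Decidable (Pre_get_labels_start_end_time frame_wise_labels bg_class) := by unfold Pre_get_labels_start_end_time; infer_instance

def pvWitness_get_labels_start_end_time : List String × List String := (["a", "a", "", "b"], [""])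

def Spec_get_labels_start_end_time (frame_wise_labels : List String) (bg_class : List String) (out : List String × List Int × List Int) : Prop := out = get_labels_start_end_time_alt frame_wise_labels bg_class
instance (frame_wise_labels : List String) (bg_class : List String) (out : List String × List Int × List Int) : Decidable (Spec_get_labels_start_end_time frame_wise_labels bg_class out) := by unfold Spec_get_labels_start_end_time; infer_instance

-- ===== CLAIM (what is proved, stated in full; the proofs are below) =====
def Claim_equal_get_labels_start_end_time : Prop := ∀ (frame_wise_labels : List String) (bg_class : List String), Dom_get_labels_start_end_time frame_wise_labels bg_class → Pre_get_labels_start_end_time frame_wise_labels bg_class → Spec_get_labels_start_end_time frame_wise_labels bg_class (get_labels_start_end_time frame_wise_labels bg_class)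

-- ===== LEMMAS AND PROOFS =====

-- What A's loop appends from position pos onward, given the current last_label.
def pvG (bg : List String) : String → Int → List String → List String × List Int × List Int × String
  | last, _, [] => ([], [], [], last)
  | last, pos, h :: t =>
    if h = last then pvG bg last (pos + 1) t
    else
      let r := pvG bg h (pos + 1) t
      ((if bg.contains h then r.1 else h :: r.1),
       (if bg.contains h then r.2.1 else pos :: r.2.1),
       (if bg.contains last then r.2.2.1 else pos :: r.2.2.1),
       r.2.2.2)

-- A's loop body, with the current frame label as an explicit pair component.
def pvStepA (bg : List String) (s : List String × List Int × List Int × String) (p : Int × String) : List String × List Int × List Int × String :=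
  if p.2 ≠ s.2.2.2 then
    ((if bg.contains p.2 then s.1 else s.1 ++ [p.2]),
     (if bg.contains p.2 then s.2.1 else s.2.1 ++ [p.1]),
     (if bg.contains s.2.2.2 then s.2.2.1 else s.2.2.1 ++ [p.1]),
     p.2)
  else s

theorem pvFoldA (bg : List String) : ∀ (xs : List String) (pos : Int) (L : List String) (S E : List Int) (last : String),
    (PySem.List.enumerate xs pos).foldl (pvStepA bg) (L, S, E, last)
      = (L ++ (pvG bg last pos xs).1, S ++ (pvG bg last pos xs).2.1,
         E ++ (pvG bg last pos xs).2.2.1, (pvG bg last pos xs).2.2.2) := by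
  intro xs
  induction xs with
  | nil => intro pos L S E last; simp [PySem.List.enumerate_nil, pvG]
  | cons h t ih =>
    intro pos L S E last
    rw [PySem.List.enumerate_cons]
    by_cases hh : h = last
    · subst hh
      simp [List.foldl_cons, pvStepA, pvG, ih]
    · have hGeq : pvG bg last pos (h :: t)
          = ((if bg.contains h then (pvG bg h (pos+1) t).1 else h :: (pvG bg h (pos+1) t).1),
             (if bg.contains h then (pvG bg h (pos+1) t).2.1 else pos :: (pvG bg h (pos+1) t).2.1),
             (if bg.contains last then (pvG bg h (pos+1) t).2.2.1 else pos :: (pvG bg h (pos+1) t).2.2.1),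
             (pvG bg h (pos+1) t).2.2.2) := by
        simp only [pvG, if_neg hh]
      have hstep : pvStepA bg (L, S, E, last) (pos, h)
          = ((if bg.contains h then L else L ++ [h]),
             (if bg.contains h then S else S ++ [pos]),
             (if bg.contains last then E else E ++ [pos]), h) := by
        simp [pvStepA, hh]
      rw [List.foldl_cons, hstep, ih, hGeq]
      by_cases hch : h ∈ bg <;> by_cases hcl : last ∈ bg <;> simp [hch, hcl]

theorem pvG_skip (bg : List String) : ∀ (grp : List String) (rest : List String) (last : String) (pos : Int),
    (∀ x ∈ grp, x = last) →
    pvG bg last pos (grp ++ rest) = pvG bg last (pos + grp.length) rest := by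
  intro grp
  induction grp with
  | nil => intro rest last pos _; simp
  | cons g gs ih =>
    intro rest last pos hall
    have hg : g = last := hall g (by simp)
    subst hg
    simp only [List.cons_append, pvG, if_pos rfl]
    have harg : pos + 1 + (gs.length : Int) = pos + ((g :: gs).length : Int) := by
      simp only [List.length_cons]; push_cast; ring
    rw [ih rest g (pos + 1) (fun x hx => hall x (by simp [hx])), harg]
    simp

theorem pvHeadDrop (h : String) : ∀ (t : List String) (a : String),
    (t.dropWhile (fun x => x == h)).head? = some a → a ≠ h := by
  intro t
  induction t with
  | nil => intro a ha; simp at ha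
  | cons x xs ih =>
    intro a ha
    by_cases hx : x = h
    · subst hx
      rw [List.dropWhile_cons_of_pos (by simp)] at ha
      exact ih a ha
    · rw [List.dropWhile_cons_of_neg (by simp [hx])] at ha
      simp at ha
      subst ha; exact hx

theorem pvMain (bg : List String) (eV : Int) : ∀ (m : Nat) (xs : List String), xs.length ≤ m →
    ∀ (cur : String) (s0 pos : Int),
    (∀ a, xs.head? = some a → a ≠ cur) →
    (let r := pvG bg cur pos xs
     let kept := (((cur, s0) :: pvRuns xs pos).zip ((pvRuns xs pos).map (·.2) ++ [eV])).filter
        (fun p => !(bg.contains p.1.1))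
     kept.map (·.1.1) = (if bg.contains cur then [] else [cur]) ++ r.1
     ∧ kept.map (·.1.2) = (if bg.contains cur then [] else [s0]) ++ r.2.1
     ∧ kept.map (·.2) = r.2.2.1 ++ (if bg.contains r.2.2.2 then [] else [eV])) := by
  intro m
  induction m with
  | zero =>
    intro xs hxs cur s0 pos _
    have : xs = [] := List.length_eq_zero_iff.mp (Nat.le_zero.mp hxs)
    subst this
    simp only [pvRuns, pvG, List.map_nil, List.nil_append, List.zip_cons_cons,
      List.zip_nil_right, List.filter_cons, List.filter_nil]
    by_cases hc : cur ∈ bg <;> simp [hc]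
  | succ m ih =>
    intro xs hxs cur s0 pos hhead
    match xs with
    | [] =>
      simp only [pvRuns, pvG, List.map_nil, List.nil_append, List.zip_cons_cons,
        List.zip_nil_right, List.filter_cons, List.filter_nil]
      by_cases hc : cur ∈ bg <;> simp [hc]
    | h :: t =>
      have hne : h ≠ cur := hhead h rfl
      set grp := t.takeWhile (fun x => x == h) with hgrp
      set rest := t.dropWhile (fun x => x == h) with hrest
      have htsplit : t = grp ++ rest := (List.takeWhile_append_dropWhile).symm
      have hGskip : pvG bg h (pos + 1) t = pvG bg h (pos + 1 + (grp.length : Int)) rest := by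
        rw [htsplit]
        exact pvG_skip bg grp rest h (pos + 1)
          (fun x hx => by have := List.mem_takeWhile_imp hx; simpa using this)
      have hG : pvG bg cur pos (h :: t)
          = (let r := pvG bg h (pos + 1 + (grp.length : Int)) rest
             ((if bg.contains h then r.1 else h :: r.1),
              (if bg.contains h then r.2.1 else pos :: r.2.1),
              (if bg.contains cur then r.2.2.1 else pos :: r.2.2.1),
              r.2.2.2)) := by
        simp only [pvG, if_neg hne, hGskip]
      have hRuns : pvRuns (h :: t) pos = (h, pos) :: pvRuns rest (pos + 1 + (grp.length : Int)) := by
        simp only [pvRuns, ← hgrp, ← hrest]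
      have hlen : rest.length ≤ m := by
        have h1 : rest.length ≤ t.length := List.length_dropWhile_le _ t
        simp only [List.length_cons] at hxs
        omega
      have hheadr : ∀ a, rest.head? = some a → a ≠ h := fun a ha => pvHeadDrop h t a ha
      have IH := ih rest hlen h pos (pos + 1 + (grp.length : Int)) hheadr
      obtain ⟨IH1, IH2, IH3⟩ := IH
      simp only [List.contains_eq_mem] at IH1 IH2 IH3
      rw [hG, hRuns]
      simp only [List.map_cons, List.cons_append, List.zip_cons_cons, List.filter_cons]
      refine ⟨?_, ?_, ?_⟩ <;>
        (by_cases hc : cur ∈ bg <;>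
         by_cases hch : h ∈ bg <;>
         simp [hc, hch, IH1, IH2, IH3])

-- ===== VERDICT (by name: the statement is the Claim_ definition above) =====
theorem get_labels_start_end_time_spec : Claim_equal_get_labels_start_end_time := by
  intro fwl bg _ hpre
  unfold Spec_get_labels_start_end_time
  match fwl, hpre with
  | h :: t, _ =>
    -- A side: rewrite the index loop as a fold over enumerate, then apply pvFoldA
    have hA : get_labels_start_end_time (h :: t) bg
        = (let r := pvG bg h 1 t
           let init : List String × List Int × List Int × String :=
             if bg.contains h then ([], [], [], h) else ([h], [(0 : Int)], [], h)
           (init.1 ++ r.1, init.2.1 ++ r.2.1,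
            (if bg.contains r.2.2.2 then init.2.2.1 ++ r.2.2.1
             else (init.2.2.1 ++ r.2.2.1) ++ [((h :: t).length : Int) - 1]))) := by
      have hkey : ∀ (init : List String × List Int × List Int × String),
          List.foldl
            (fun s i =>
              if PySem.List.pyGetD (h :: t) i "" ≠ s.2.2.2 then
                (if bg.contains (PySem.List.pyGetD (h :: t) i "") then s.1
                   else s.1 ++ [PySem.List.pyGetD (h :: t) i ""],
                 if bg.contains (PySem.List.pyGetD (h :: t) i "") then s.2.1 else s.2.1 ++ [i],
                 if bg.contains s.2.2.2 then s.2.2.1 else s.2.2.1 ++ [i],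
                 PySem.List.pyGetD (h :: t) i "")
              else s)
            init (PySem.List.pyRange 0 (((h :: t).length : Nat) : Int) 1)
          = List.foldl (pvStepA bg) init (PySem.List.enumerate (h :: t) 0) := by
        intro init
        rw [PySem.List.enumerate_eq_map_pyRange (d := ""), List.foldl_map]
        rfl
      unfold get_labels_start_end_time
      simp only []
      rw [hkey]
      by_cases hch : h ∈ bg
      · rw [if_pos (by simp [hch] : bg.contains h = true)]
        rw [PySem.List.enumerate_cons, List.foldl_cons]
        have hstep : pvStepA bg ([], [], [], h) (0, h) = ([], [], [], h) := by
          simp [pvStepA]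
        rw [hstep, pvFoldA]
        simp [hch]
      · rw [if_neg (by simp [hch] : ¬ bg.contains h = true)]
        rw [PySem.List.enumerate_cons, List.foldl_cons]
        have hstep : pvStepA bg ([h], [(0 : Int)], [], h) (0, h) = ([h], [(0 : Int)], [], h) := by
          simp [pvStepA]
        rw [hstep, pvFoldA]
        simp [hch]
    rw [hA]
    -- B side: pvMain with cur := h, s0 := 0
    set grp := t.takeWhile (fun x => x == h) with hgrp
    set rest := t.dropWhile (fun x => x == h) with hrest
    have htsplit : t = grp ++ rest := (List.takeWhile_append_dropWhile).symm
    have hGskip : pvG bg h 1 t = pvG bg h (1 + (grp.length : Int)) rest := by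
      conv_lhs => rw [htsplit]
      exact pvG_skip bg grp rest h 1
        (fun x hx => by have := List.mem_takeWhile_imp hx; simpa using this)
    have hMain := pvMain bg (((h :: t).length : Int) - 1) rest.length rest le_rfl h 0
        (1 + (grp.length : Int)) (fun a ha => pvHeadDrop h t a (by rw [hrest] at ha; exact ha))
    obtain ⟨M1, M2, M3⟩ := hMain
    have hRuns0 : pvRuns (h :: t) 0 = (h, 0) :: pvRuns rest (1 + (grp.length : Int)) := by
      simp only [pvRuns, ← hgrp, ← hrest]
      norm_num
    unfold get_labels_start_end_time_alt
    simp only [hRuns0, List.drop_succ_cons, List.drop_zero]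
    rw [hGskip]
    refine Prod.ext ?_ (Prod.ext ?_ ?_)
    · simp only [M1]
      by_cases hch : h ∈ bg <;> simp [hch]
    · simp only [M2]
      by_cases hch : h ∈ bg <;> simp [hch]
    · simp only [M3]
      by_cases hcf : (pvG bg h (1 + (grp.length : Int)) rest).2.2.2 ∈ bg <;>
        by_cases hch : h ∈ bg <;> simp [hcf, hch]
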